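-- pv_equiv track=rewrite | github.com/XiaoShuhong/ECE365SP21 | nlplab2_dist/lab2.py | prune_vocabulary
-- ===== SOURCE A (Python) =====
-- from collections import defaultdict, Counter
--
-- def prune_vocabulary(training_counts, target_data, min_counts):
--
--     words=[e[0] for e in training_counts.items() if (e[1]>=min_counts)]
--     res_list=[]
--     for counter in target_data:
--         dic={}
--         for e in counter.items():
--             if e[0] in words:
--                 dic[e[0]]=counter[e[0]]
--         res_list.append(Counter(dic))
--     return res_list,set(words)
-- ===== SOURCE B (Python) =====
-- from collections import Counter
--
-- def prune_vocabulary(training_counts, target_data, min_counts):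
--     # Sort-merge algorithm: sort the vocabulary and each counter's indexed
--     # items by word, intersect them with a two-pointer merge (no per-item
--     # membership tests), then sort the kept entries back into counter order.
--     vocab = [w for w, c in training_counts.items() if c >= min_counts]
--     sv = sorted(vocab)
--     res_list = []
--     for counter in target_data:
--         indexed = sorted(enumerate(counter.items()), key=lambda t: t[1][0])
--         kept = []
--         i = j = 0
--         while i < len(indexed) and j < len(sv):
--             w = indexed[i][1][0]
--             if w < sv[j]:
--                 i += 1
--             elif sv[j] < w:
--                 j += 1
--             else:
--                 kept.append(indexed[i])
--                 i += 1
--                 j += 1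
--         kept.sort(key=lambda t: t[0])
--         res_list.append(Counter(dict(p for _, p in kept)))
--     return res_list, set(vocab)
-- ===== Notes on version B (the rewrite author's own statement) =====
-- stated objective: alternative
-- what changed: B replaces A's per-item scan of the vocabulary list by a sort-merge intersection: it sorts the vocabulary once and each counter's indexed items by word, intersects the two sorted sequences with a two-pointer merge (no membership tests anywhere), and restores the counter's insertion order by re-sorting the kept entries by index.
import Mathlib
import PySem

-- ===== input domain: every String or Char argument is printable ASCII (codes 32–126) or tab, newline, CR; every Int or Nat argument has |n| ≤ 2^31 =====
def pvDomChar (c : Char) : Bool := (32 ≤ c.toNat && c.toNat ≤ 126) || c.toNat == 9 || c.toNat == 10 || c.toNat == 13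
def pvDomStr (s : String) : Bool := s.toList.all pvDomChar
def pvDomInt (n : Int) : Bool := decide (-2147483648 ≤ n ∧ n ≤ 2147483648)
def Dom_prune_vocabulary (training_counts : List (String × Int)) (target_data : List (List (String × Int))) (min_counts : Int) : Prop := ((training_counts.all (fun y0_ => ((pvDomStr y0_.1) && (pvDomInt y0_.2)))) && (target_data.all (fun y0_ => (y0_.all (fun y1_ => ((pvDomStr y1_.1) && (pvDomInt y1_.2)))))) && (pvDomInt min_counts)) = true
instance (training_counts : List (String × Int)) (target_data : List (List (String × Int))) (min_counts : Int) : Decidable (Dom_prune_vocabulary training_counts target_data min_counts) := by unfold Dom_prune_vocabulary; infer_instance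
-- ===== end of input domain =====

-- B prunes each counter by a sort-merge intersection (sort vocabulary and indexed items by
-- word, two-pointer merge, re-sort kept entries by index) instead of A's per-item scans of
-- the vocabulary list (objective: alternative).

-- ===== PORT A =====
def prune_vocabulary (training_counts : List (String × Int)) (target_data : List (List (String × Int))) (min_counts : Int) : (List (List (String × Int))) × List String :=
  let words := (training_counts.filter (fun e => decide (min_counts ≤ e.2))).map (fun e => e.1)
  let res_list := target_data.foldl (fun acc counter =>
    let dic := counter.foldl (fun (dic : PySem.Dict String Int) e =>
      if words.contains e.1 then dic.insert e.1 ((PySem.Dict.mk counter).getD e.1 0) else dic)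
      PySem.Dict.empty
    acc ++ [dic.items]) []
  (res_list, PySem.Set.ofList words)

-- ===== PORT B =====
-- the two-pointer while loop over the two sorted lists, as recursion on the suffixes
def pvMerge : List (Int × (String × Int)) → List String → List (Int × (String × Int))
  | [], _ => []
  | _ :: _, [] => []
  | x :: xs, y :: ys =>
    if x.2.1 < y then pvMerge xs (y :: ys)
    else if y < x.2.1 then pvMerge (x :: xs) ys
    else x :: pvMerge xs ys

-- one counter: sort indexed items by word, merge with sorted vocab, re-sort by index
def pvPrunedB (sv : List String) (counter : List (String × Int)) : List (String × Int) :=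
  let indexed := PySem.List.sorted (PySem.List.enumerate counter) (fun t => t.2.1)
  let kept := pvMerge indexed sv
  let kept2 := PySem.List.sorted kept (fun t => t.1)
  (PySem.Dict.ofList (kept2.map (fun t => t.2))).items

def prune_vocabulary_alt (training_counts : List (String × Int)) (target_data : List (List (String × Int))) (min_counts : Int) : (List (List (String × Int))) × List String :=
  let vocab := (training_counts.filter (fun e => decide (min_counts ≤ e.2))).map (fun e => e.1)
  let sv := PySem.List.sorted vocab (fun w => w)
  (target_data.map (pvPrunedB sv), PySem.Set.ofList vocab)

-- ===== PRECONDITION & SPEC =====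
-- training_counts is a Python dict and each counter a Counter, whose keys are necessarily distinct;
-- Pre_ requires exactly that, since duplicate-key association lists represent no Python input.
def Pre_prune_vocabulary (training_counts : List (String × Int)) (target_data : List (List (String × Int))) (min_counts : Int) : Prop :=
  (training_counts.map Prod.fst).Nodup ∧ ∀ c ∈ target_data, (c.map Prod.fst).Nodup
instance (training_counts : List (String × Int)) (target_data : List (List (String × Int))) (min_counts : Int) : Decidable (Pre_prune_vocabulary training_counts target_data min_counts) := by unfold Pre_prune_vocabulary; infer_instance

def pvWitness_prune_vocabulary : (List (String × Int)) × (List (List (String × Int))) × Int :=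
  ([("a", 2), ("b", 1)], [[("a", 3), ("c", 4)], []], 2)

def Spec_prune_vocabulary (training_counts : List (String × Int)) (target_data : List (List (String × Int))) (min_counts : Int) (out : (List (List (String × Int))) × List String) : Prop := out = prune_vocabulary_alt training_counts target_data min_counts
instance (training_counts : List (String × Int)) (target_data : List (List (String × Int))) (min_counts : Int) (out : (List (List (String × Int))) × List String) : Decidable (Spec_prune_vocabulary training_counts target_data min_counts out) := by unfold Spec_prune_vocabulary; infer_instance

-- ===== CLAIM (what is proved, stated in full; the proofs are below) =====
def Claim_equal_prune_vocabulary : Prop := ∀ (training_counts : List (String × Int)) (target_data : List (List (String × Int))) (min_counts : Int), Dom_prune_vocabulary training_counts target_data min_counts → Pre_prune_vocabulary training_counts target_data min_counts → Spec_prune_vocabulary training_counts target_data min_counts (prune_vocabulary training_counts target_data min_counts)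

-- ===== LEMMAS AND PROOFS =====

-- a ≤-sorted list whose keys are distinct is strictly sorted
theorem pv_pairwise_lt {α κ : Type} [LinearOrder κ] (key : α → κ) (l : List α)
    (h1 : l.Pairwise (fun a b => key a ≤ key b)) (h2 : (l.map key).Nodup) :
    l.Pairwise (fun a b => key a < key b) := by
  induction l with
  | nil => simp
  | cons a l ih =>
    simp only [List.map_cons, List.nodup_cons] at h2
    rcases List.pairwise_cons.mp h1 with ⟨ha, hl⟩
    refine List.pairwise_cons.mpr ⟨fun b hb => ?_, ih hl h2.2⟩
    exact lt_of_le_of_ne (ha b hb) (fun he => h2.1 (he ▸ List.mem_map_of_mem hb))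

-- the two-pointer merge of strictly sorted sequences is a filter of the left one
theorem pv_merge_filter (xs : List (Int × (String × Int))) (ys : List String)
    (hx : xs.Pairwise (fun a b => a.2.1 < b.2.1)) (hy : ys.Pairwise (· < ·)) :
    pvMerge xs ys = xs.filter (fun t => ys.contains t.2.1) := by
  induction xs generalizing ys with
  | nil => simp [pvMerge]
  | cons x xs ihx =>
    induction ys with
    | nil => simp [pvMerge]
    | cons y ys ihy =>
      rcases List.pairwise_cons.mp hx with ⟨hxh, hxt⟩
      rcases List.pairwise_cons.mp hy with ⟨hyh, hyt⟩
      by_cases h1 : x.2.1 < y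
      · have hne : (y :: ys).contains x.2.1 = false := by
          simp only [List.contains_eq_mem, decide_eq_false_iff_not, List.mem_cons]
          rintro (rfl | hm)
          · exact absurd h1 (lt_irrefl _)
          · exact absurd (lt_trans h1 (hyh _ hm)) (lt_irrefl _)
        simp only [pvMerge, if_pos h1, List.filter_cons, hne, Bool.false_eq_true, if_neg,
          not_false_iff]
        exact ihx (y :: ys) hxt hy
      · by_cases h2 : y < x.2.1
        · have heq : pvMerge (x :: xs) ys = (x :: xs).filter (fun t => ys.contains t.2.1) :=
            ihy hyt
          rw [pvMerge, if_neg h1, if_pos h2, heq]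
          apply List.filter_congr
          intro t ht
          have hty : y < t.2.1 := by
            rcases List.mem_cons.mp ht with rfl | hm
            · exact h2
            · exact lt_trans h2 (hxh _ hm)
          simp only [List.contains_eq_mem, List.mem_cons, decide_eq_decide]
          constructor
          · exact Or.inr
          · rintro (rfl | hm)
            · exact absurd hty (lt_irrefl _)
            · exact hm
        · have hxy : x.2.1 = y := le_antisymm (not_lt.mp h2) (not_lt.mp h1)
          have hcy : (y :: ys).contains x.2.1 = true := by
            simp [List.contains_eq_mem, hxy]
          rw [pvMerge, if_neg h1, if_neg h2, List.filter_cons, hcy, if_pos rfl,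
            ihx ys hxt hyt]
          congr 1
          apply List.filter_congr
          intro t ht
          have hty : y < t.2.1 := hxy ▸ hxh _ ht
          simp only [List.contains_eq_mem, List.mem_cons, decide_eq_decide]
          constructor
          · exact Or.inr
          · rintro (rfl | hm)
            · exact absurd hty (lt_irrefl _)
            · exact hm

-- filtering the enumeration by a property of the element, then dropping indices, is a filter
theorem pv_filter_enumerate (counter : List (String × Int)) (q : String × Int → Bool) (s : Int) :
    ((PySem.List.enumerate counter s).filter (fun t => q t.2)).map (fun t => t.2)
      = counter.filter q := by
  induction counter generalizing s with
  | nil => simp [PySem.List.enumerate_nil]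
  | cons e l ih =>
    rw [PySem.List.enumerate_cons, List.filter_cons, List.filter_cons]
    by_cases hq : q e
    · simp only [hq, if_pos trivial, List.map_cons, ih]
    · simp only [hq, Bool.false_eq_true, if_neg, not_false_iff, ih]

-- building a dict from distinct-key pairs returns exactly those pairs
theorem pv_items_update (l : List (String × Int)) (d : PySem.Dict String Int)
    (hnd : (l.map Prod.fst).Nodup) (hfresh : ∀ p ∈ l, d.contains p.1 = false) :
    (l.foldl (fun (dic : PySem.Dict String Int) e => dic.insert e.1 e.2) d).items
      = d.items ++ l := by
  induction l generalizing d with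
  | nil => simp
  | cons e l ih =>
    simp only [List.map_cons, List.nodup_cons] at hnd
    have hfe : d.contains e.1 = false := hfresh e (List.mem_cons_self ..)
    have hfresh' : ∀ p ∈ l, (d.insert e.1 e.2).contains p.1 = false := by
      intro p hp
      have hne : p.1 ≠ e.1 := fun h => hnd.1 (h ▸ List.mem_map_of_mem hp)
      simp [PySem.Dict.contains_insert, hne, hfresh p (List.mem_cons_of_mem _ hp)]
    rw [List.foldl_cons, ih _ hnd.2 hfresh', PySem.Dict.items_insert_of_not_contains _ _ hfe]
    simp

-- A's conditional-insert loop over items with distinct, fresh keys appends the filtered items.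
theorem pv_foldl_insert (words : List String) (f : String × Int → Int) (l : List (String × Int))
    (d : PySem.Dict String Int) (hnd : (l.map Prod.fst).Nodup)
    (hfresh : ∀ p ∈ l, d.contains p.1 = false) :
    (l.foldl (fun (dic : PySem.Dict String Int) e =>
        if words.contains e.1 then dic.insert e.1 (f e) else dic) d).items
      = d.items ++ (l.filter (fun e => words.contains e.1)).map (fun e => (e.1, f e)) := by
  induction l generalizing d with
  | nil => simp
  | cons e l ih =>
    simp only [List.map_cons, List.nodup_cons] at hnd
    have hfe : d.contains e.1 = false := hfresh e (List.mem_cons_self ..)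
    by_cases hw : words.contains e.1
    · have hfresh' : ∀ p ∈ l, (d.insert e.1 (f e)).contains p.1 = false := by
        intro p hp
        have hne : p.1 ≠ e.1 := by
          intro h; exact hnd.1 (h ▸ List.mem_map_of_mem hp)
        simp [PySem.Dict.contains_insert, hne, hfresh p (List.mem_cons_of_mem _ hp)]
      simp only [List.foldl_cons, hw, if_pos, List.filter_cons_of_pos, List.map_cons,
        ih _ hnd.2 hfresh', PySem.Dict.items_insert_of_not_contains _ _ hfe]
      simp
    · have hw' : words.contains e.1 = false := by simpa using hw
      simp only [List.foldl_cons, hw', Bool.false_eq_true, if_neg, not_false_iff,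
        List.filter_cons_of_neg]
      exact ih d hnd.2 fun p hp => hfresh p (List.mem_cons_of_mem _ hp)

-- A's per-counter dict is the counter filtered by vocabulary membership
theorem pv_A_counter (words : List String) (counter : List (String × Int))
    (hc : (counter.map Prod.fst).Nodup) :
    (counter.foldl (fun (dic : PySem.Dict String Int) e =>
        if words.contains e.1 then dic.insert e.1 ((PySem.Dict.mk counter).getD e.1 0) else dic)
      PySem.Dict.empty).items = counter.filter (fun e => words.contains e.1) := by
  have hkeys : (PySem.Dict.mk counter).keys.Nodup := by simpa [PySem.Dict.keys]
  rw [pv_foldl_insert _ _ _ _ hc (by intro p _; simp)]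
  have hemp : (PySem.Dict.empty : PySem.Dict String Int).items = [] := rfl
  rw [hemp, List.nil_append]
  have h : ∀ e ∈ counter.filter (fun e => words.contains e.1),
      (e.1, (PySem.Dict.mk counter).getD e.1 0) = e := by
    intro e he
    have hec : e ∈ counter := List.mem_of_mem_filter he
    have hgd : (PySem.Dict.mk counter).getD e.1 0 = e.2 :=
      PySem.Dict.getD_of_mem_items _ (by exact hec) hkeys 0
    simp [hgd]
  rw [List.map_congr_left h]; simp

-- B's per-counter result is the same filter
theorem pv_B_counter (words : List String) (counter : List (String × Int))
    (hw : words.Nodup) (hc : (counter.map Prod.fst).Nodup) :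
    pvPrunedB (PySem.List.sorted words (fun w => w)) counter
      = counter.filter (fun e => words.contains e.1) := by
  set sv := PySem.List.sorted words (fun w => w) with hsv
  set indexed := PySem.List.sorted (PySem.List.enumerate counter) (fun t => t.2.1) with hidx
  -- strict sortedness of both merge inputs
  have hperm : indexed.Perm (PySem.List.enumerate counter) :=
    PySem.List.sorted_perm _ _ _
  have hmapkeys : (indexed.map (fun t => t.2.1)).Nodup := by
    have h1 : (indexed.map (fun t => t.2.1)).Perm
        ((PySem.List.enumerate counter).map (fun t => t.2.1)) := hperm.map _
    have h2 : ((PySem.List.enumerate counter).map (fun t => t.2.1))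
        = counter.map Prod.fst := by
      have := PySem.List.map_snd_enumerate counter (0 : Int)
      calc (PySem.List.enumerate counter).map (fun t => t.2.1)
          = ((PySem.List.enumerate counter).map (fun t => t.2)).map Prod.fst := by
            rw [List.map_map]; rfl
        _ = counter.map Prod.fst := by rw [this]
    exact (h1.nodup_iff).mpr (h2 ▸ hc)
  have hxs : indexed.Pairwise (fun a b => a.2.1 < b.2.1) :=
    pv_pairwise_lt (fun t : Int × (String × Int) => t.2.1) indexed
      (PySem.List.sorted_pairwise _ _) hmapkeys
  have hys : sv.Pairwise (· < ·) := by
    have hle : sv.Pairwise (fun a b => a ≤ b) := PySem.List.sorted_pairwise _ _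
    have hnd : (sv.map (fun w => w)).Nodup := by
      simpa using ((PySem.List.sorted_perm words (fun w => w) false).nodup_iff).mpr hw
    exact pv_pairwise_lt (fun w => w) _ hle hnd
  -- merge = filter; re-sort by index = filter of the enumeration
  have hmerge : pvMerge indexed sv = indexed.filter (fun t => sv.contains t.2.1) :=
    pv_merge_filter _ _ hxs hys
  have hkept : PySem.List.sorted (pvMerge indexed sv) (fun t => t.1)
      = (PySem.List.enumerate counter).filter (fun t => sv.contains t.2.1) := by
    apply PySem.List.sorted_eq_of_perm_of_pairwise_lt
    · rw [hmerge]
      exact (hperm.filter _).symm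
    · exact (PySem.List.pairwise_lt_enumerate counter 0).filter _
  -- assemble
  show (PySem.Dict.ofList ((PySem.List.sorted (pvMerge indexed sv) (fun t => t.1)).map
      (fun t => t.2))).items = _
  rw [hkept, pv_filter_enumerate counter (fun e => sv.contains e.1) 0]
  have hfeq : counter.filter (fun e => sv.contains e.1)
      = counter.filter (fun e => words.contains e.1) := by
    apply List.filter_congr
    intro p _
    simp [List.contains_eq_mem, hsv, PySem.List.mem_sorted]
  rw [hfeq]
  have hsubl : (counter.filter (fun e => words.contains e.1)).Sublist counter :=
    List.filter_sublist
  have hsub : ((counter.filter (fun e => words.contains e.1)).map Prod.fst).Nodup :=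
    (hsubl.map Prod.fst).nodup hc
  have : PySem.Dict.ofList (counter.filter (fun e => words.contains e.1))
      = (counter.filter (fun e => words.contains e.1)).foldl
          (fun (dic : PySem.Dict String Int) e => dic.insert e.1 e.2) PySem.Dict.empty := by
    rfl
  rw [this, pv_items_update _ _ hsub (by intro p _; simp)]
  rfl

theorem pv_build (f g : List (String × Int) → List (String × Int))
    (td : List (List (String × Int))) (init : List (List (String × Int)))
    (h : ∀ c ∈ td, f c = g c) :
    td.foldl (fun acc c => acc ++ [f c]) init = init ++ td.map g := by
  induction td generalizing init with
  | nil => simp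
  | cons c td ih =>
    rw [List.foldl_cons, List.map_cons, ih _ (fun x hx => h x (List.mem_cons_of_mem _ hx)),
      h c (List.mem_cons_self ..)]
    simp

-- ===== VERDICT (by name: the statement is the Claim_ definition above) =====
theorem prune_vocabulary_spec : Claim_equal_prune_vocabulary := by
  intro tc td mc _ hpre
  unfold Spec_prune_vocabulary prune_vocabulary prune_vocabulary_alt
  refine Prod.ext ?_ rfl
  simp only
  set words := (tc.filter (fun e => decide (mc ≤ e.2))).map (fun e => e.1) with hwords
  have hwnd : words.Nodup := by
    have hsubl : (tc.filter (fun e => decide (mc ≤ e.2))).Sublist tc := List.filter_sublist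
    exact (hsubl.map (fun e => e.1)).nodup (by exact hpre.1)
  rw [pv_build
      (fun counter => (counter.foldl (fun (dic : PySem.Dict String Int) e =>
        if words.contains e.1 then dic.insert e.1 ((PySem.Dict.mk counter).getD e.1 0) else dic)
        PySem.Dict.empty).items)
      (pvPrunedB (PySem.List.sorted words (fun w => w))) td []
      (fun c hc => by
        show (c.foldl (fun (dic : PySem.Dict String Int) e =>
            if words.contains e.1 then dic.insert e.1 ((PySem.Dict.mk c).getD e.1 0) else dic)
          PySem.Dict.empty).items = pvPrunedB (PySem.List.sorted words (fun w => w)) c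
        rw [pv_A_counter words c (hpre.2 c hc), pv_B_counter words c hwnd (hpre.2 c hc)])]
  simp
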